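-- pv_equiv track=rewrite | github.com/viabard/biological-models-in-python | Week 2/gcaaRCCount.py | findSeqCount
-- ===== SOURCE A (Python) =====
-- def findSeqCount(file_string, sequence_to_search): #function to find how many times the sequence appears
--     retval = 0
--     for i in range(len(file_string) - len(sequence_to_search) + 1): #for i in range of the length of the string, minus the sequence to search length to avoid looking past the list
--         count = 0
--         for j in range(len(sequence_to_search)): #for i in range length of sequence that is being searched for...
--             if(sequence_to_search[j] == file_string[i + j]): #compare the sequence, and the sequence being searched for
--                 count += 1
--                 if count == 4:
--                     retval += 1
--             else: #if its not, just move to the next nucleotide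
--                 break
--     return retval
-- ===== SOURCE B (Python) =====
-- def findSeqCount(file_string, sequence_to_search):
--     if len(sequence_to_search) < 4:
--         return 0
--     prefix = sequence_to_search[:4]
--     limit = len(file_string) - len(sequence_to_search) + 1
--     return sum(1 for i in range(limit) if file_string[i:i+4] == prefix)
-- ===== Notes on version B (the rewrite author's own statement) =====
-- stated objective: faster
-- what changed: B recognises that A only ever counts matches of the pattern's 4-char prefix, so it extracts that prefix once and counts equal 4-char windows with one slice comparison per position, eliminating A's inner char-by-char counter loop (with its break and count==4 bookkeeping).
import Mathlib
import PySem

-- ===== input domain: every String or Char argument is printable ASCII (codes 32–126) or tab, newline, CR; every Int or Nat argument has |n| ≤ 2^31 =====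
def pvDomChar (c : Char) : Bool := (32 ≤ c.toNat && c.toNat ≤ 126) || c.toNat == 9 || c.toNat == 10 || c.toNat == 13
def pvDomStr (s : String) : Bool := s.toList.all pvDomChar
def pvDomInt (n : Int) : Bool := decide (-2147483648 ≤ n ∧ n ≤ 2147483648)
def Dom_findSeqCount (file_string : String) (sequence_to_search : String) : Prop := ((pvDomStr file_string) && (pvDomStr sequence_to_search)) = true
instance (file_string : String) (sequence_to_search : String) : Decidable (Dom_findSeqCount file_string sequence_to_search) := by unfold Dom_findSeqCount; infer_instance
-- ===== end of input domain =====

-- B replaces A's inner character-by-character counter loop by extracting the pattern's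
-- 4-char prefix once and counting 4-char windows equal to it (objective: simpler).

-- ===== PORT A =====
-- inner 'for j in range(len(sequence_to_search))' loop of A, with its early 'break';
-- the unreachable-index arm returns retval (Python's IndexError never fires here: both
-- indices are in range for every i the outer loop visits).
def findSeqCountInner (fl sl : List Char) (i : Int) : List Int → Int → Int → Int
  | [], _, retval => retval
  | j :: rest, count, retval =>
    match PySem.List.pyGet? sl j, PySem.List.pyGet? fl (i + j) with
    | some cj, some ci =>
      if cj == ci then
        findSeqCountInner fl sl i rest (count + 1)
          (if count + 1 == 4 then retval + 1 else retval)
      else retval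
    | _, _ => retval

def findSeqCount (file_string : String) (sequence_to_search : String) : Int :=
  (PySem.List.pyRange 0 ((file_string.toList.length : Int) - (sequence_to_search.toList.length : Int) + 1) 1).foldl
    (fun retval i =>
      findSeqCountInner file_string.toList sequence_to_search.toList i
        (PySem.List.pyRange 0 (sequence_to_search.toList.length : Int) 1) 0 retval) 0

-- ===== PORT B =====
def findSeqCount_alt (file_string : String) (sequence_to_search : String) : Int :=
  if (sequence_to_search.toList.length : Int) < 4 then 0
  else
    ((PySem.List.pyRange 0 ((file_string.toList.length : Int) - (sequence_to_search.toList.length : Int) + 1) 1).map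
      (fun i =>
        if PySem.List.slice file_string.toList (some i) (some (i + 4))
            == PySem.List.slice sequence_to_search.toList none (some 4)
        then (1 : Int) else 0)).sum

-- ===== PRECONDITION & SPEC =====
def Spec_findSeqCount (file_string : String) (sequence_to_search : String) (out : Int) : Prop := out = findSeqCount_alt file_string sequence_to_search
instance (file_string : String) (sequence_to_search : String) (out : Int) : Decidable (Spec_findSeqCount file_string sequence_to_search out) := by unfold Spec_findSeqCount; infer_instance

-- ===== CLAIM (what is proved, stated in full; the proofs are below) =====
def Claim_equal_findSeqCount : Prop := ∀ (file_string : String) (sequence_to_search : String), Dom_findSeqCount file_string sequence_to_search → Spec_findSeqCount file_string sequence_to_search (findSeqCount file_string sequence_to_search)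

-- ===== LEMMAS AND PROOFS =====

-- One step of A's inner loop when both indexings succeed.
lemma inner_cons (fl sl : List Char) (i j : Int) (rest : List Int) (count retval : Int)
    (cj ci : Char) (h1 : PySem.List.pyGet? sl j = some cj)
    (h2 : PySem.List.pyGet? fl (i + j) = some ci) :
    findSeqCountInner fl sl i (j :: rest) count retval =
      if (cj == ci) = true then
        findSeqCountInner fl sl i rest (count + 1)
          (if (count + 1 == 4) = true then retval + 1 else retval)
      else retval := by
  simp only [findSeqCountInner]
  rw [h1, h2]

-- A's inner loop, started at j = jn with count = jn (the loop invariant: count equals the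
-- number of consecutive matches seen so far), adds 1 exactly when the matches reach index 3.
lemma inner_spec_aux (fl sl : List Char) (i : Nat) (hL : i + sl.length ≤ fl.length) :
    ∀ (n jn : Nat) (acc : Int), sl.length - jn ≤ n →
      findSeqCountInner fl sl (i : Int) (PySem.List.pyRange (jn : Int) (sl.length : Int) 1) (jn : Int) acc
        = acc + (if jn < 4 ∧ 4 ≤ sl.length ∧ (∀ k, jn ≤ k → k < 4 → sl[k]? = fl[i + k]?) then 1 else 0) := by
  intro n
  induction n with
  | zero =>
    intro jn acc hle
    rw [PySem.List.pyRange_one_eq_nil (by exact_mod_cast (by omega : sl.length ≤ jn))]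
    simp only [findSeqCountInner]
    rw [if_neg (by rintro ⟨h1, h2, _⟩; omega)]
    omega
  | succ n ih =>
    intro jn acc hle
    by_cases hj : jn < sl.length
    · rw [PySem.List.pyRange_one_cons (by exact_mod_cast hj)]
      have hij : i + jn < fl.length := by omega
      have h1 : PySem.List.pyGet? sl (jn : Int) = some sl[jn] := by
        rw [PySem.List.pyGet?_natCast]; simp [List.getElem?_eq_getElem hj]
      have h2 : PySem.List.pyGet? fl ((i : Int) + (jn : Int)) = some fl[i + jn] := by
        rw [show ((i : Int) + (jn : Int)) = ((i + jn : Nat) : Int) by push_cast; ring,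
          PySem.List.pyGet?_natCast]
        simp [List.getElem?_eq_getElem hij]
      rw [inner_cons fl sl (i : Int) (jn : Int) _ _ _ _ _ h1 h2]
      by_cases heq : sl[jn] = fl[i + jn]
      · rw [if_pos (by simp [heq])]
        have hc : ((jn : Int) + 1) = ((jn + 1 : Nat) : Int) := by push_cast; ring
        rw [hc, ih (jn + 1) _ (by omega)]
        have hk0 : sl[jn]? = fl[i + jn]? := by
          simp [List.getElem?_eq_getElem hj, List.getElem?_eq_getElem hij, heq]
        by_cases hj4 : jn + 1 = 4
        · have hjn : jn = 3 := by omega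
          subst hjn
          rw [if_pos (by decide)]
          rw [if_neg (by rintro ⟨h, _⟩; omega)]
          rw [if_pos ⟨by omega, by omega, by
            intro k hk1 hk2
            have hk3 : k = 3 := by omega
            subst hk3; exact hk0⟩]
          ring
        · rw [if_neg (by
            simp only [beq_iff_eq]
            intro h; exact hj4 (by exact_mod_cast h))]
          by_cases hlt : jn + 1 < 4
          · rcases Classical.em (4 ≤ sl.length ∧ (∀ k, jn + 1 ≤ k → k < 4 → sl[k]? = fl[i + k]?)) with hC | hC
            · rw [if_pos ⟨hlt, hC.1, hC.2⟩,
                if_pos ⟨by omega, hC.1, by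
                  intro k hk1 hk2
                  rcases Nat.eq_or_lt_of_le hk1 with h | h
                  · exact h ▸ hk0
                  · exact hC.2 k (by omega) hk2⟩]
            · rw [if_neg (by rintro ⟨_, hb, hc'⟩; exact hC ⟨hb, hc'⟩),
                if_neg (by
                  rintro ⟨_, hb, hc'⟩
                  exact hC ⟨hb, fun k hk1 hk2 => hc' k (by omega) hk2⟩)]
          · rw [if_neg (by rintro ⟨h, _⟩; omega), if_neg (by rintro ⟨h, _⟩; omega)]
      · rw [if_neg (by simp [heq])]
        rw [if_neg (by
          rintro ⟨hj4, hm4, hall⟩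
          have hx := hall jn le_rfl hj4
          simp [List.getElem?_eq_getElem hj, List.getElem?_eq_getElem hij] at hx
          exact heq hx)]
        omega
    · rw [PySem.List.pyRange_one_eq_nil (by exact_mod_cast (by omega : sl.length ≤ jn))]
      simp only [findSeqCountInner]
      rw [if_neg (by rintro ⟨h1, h2, _⟩; omega)]
      omega

-- The full inner loop (started at j = 0, count = 0).
lemma inner_eq (fl sl : List Char) (i : Nat) (hL : i + sl.length ≤ fl.length) (acc : Int) :
    findSeqCountInner fl sl (i : Int) (PySem.List.pyRange 0 (sl.length : Int) 1) 0 acc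
      = acc + (if 0 < 4 ∧ 4 ≤ sl.length ∧ (∀ k, 0 ≤ k → k < 4 → sl[k]? = fl[i + k]?) then 1 else 0) := by
  have h := inner_spec_aux fl sl i hL sl.length 0 acc (by omega)
  simp only [Nat.cast_zero] at h
  exact h

-- Character-wise matching of the first four positions is 4-window equality.
lemma window_eq (fl sl : List Char) (i : Nat) :
    ((fl.drop i).take 4 = sl.take 4) ↔ (∀ k, k < 4 → sl[k]? = fl[i + k]?) := by
  constructor
  · intro h k hk
    have hx := congrArg (fun xs => xs[k]?) h
    simpa [List.getElem?_take, List.getElem?_drop, hk] using hx.symm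
  · intro h
    apply List.ext_getElem?
    intro k
    simp only [List.getElem?_take, List.getElem?_drop]
    split_ifs with hk
    · exact (h k hk).symm
    · rfl

-- ===== VERDICT (by name: the statement is the Claim_ definition above) =====
theorem findSeqCount_spec : Claim_equal_findSeqCount := by
  intro fs seq _
  unfold Spec_findSeqCount findSeqCount findSeqCount_alt
  by_cases hm : (seq.toList.length : Int) < 4
  · rw [if_pos hm]
    rw [PySem.List.foldl_congr_mem _ _ (fun acc _ => acc) 0 (by
      intro acc i hi
      rw [PySem.List.mem_pyRange_one] at hi
      obtain ⟨h0, hlt⟩ := hi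
      have hL : i.toNat + seq.toList.length ≤ fs.toList.length := by omega
      rw [show i = ((i.toNat : Nat) : Int) from (Int.toNat_of_nonneg h0).symm,
        inner_eq fs.toList seq.toList i.toNat hL acc]
      rw [if_neg (by rintro ⟨_, h4, _⟩; omega)]
      simp)]
    exact List.foldl_fixed _
  · rw [if_neg hm]
    rw [PySem.List.foldl_congr_mem _ _
      (fun acc i => acc +
        (if PySem.List.slice fs.toList (some i) (some (i + 4))
            == PySem.List.slice seq.toList none (some 4)
         then (1 : Int) else 0)) 0 (by
      intro acc i hi
      rw [PySem.List.mem_pyRange_one] at hi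
      obtain ⟨h0, hlt⟩ := hi
      have hL : i.toNat + seq.toList.length ≤ fs.toList.length := by omega
      rw [show i = ((i.toNat : Nat) : Int) from (Int.toNat_of_nonneg h0).symm,
        inner_eq fs.toList seq.toList i.toNat hL acc]
      congr 1
      have hpre : PySem.List.slice seq.toList none (some (4 : Int)) = seq.toList.take 4 :=
        PySem.List.slice_to seq.toList (by norm_num)
      have hwin : PySem.List.slice fs.toList (some ((i.toNat : Nat) : Int)) (some (((i.toNat : Nat) : Int) + 4))
          = (fs.toList.drop i.toNat).take 4 := by
        rw [show (((i.toNat : Nat) : Int) + 4) = ((i.toNat : Nat) : Int) + ((4 : Nat) : Int) by norm_num]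
        exact PySem.List.slice_natCast_add fs.toList i.toNat 4
      rw [hpre, hwin]
      rcases Classical.em (∀ k, k < 4 → seq.toList[k]? = fs.toList[i.toNat + k]?) with hC | hC
      · rw [if_pos ⟨by omega, by omega, fun k _ hk => hC k hk⟩,
          if_pos (beq_iff_eq.mpr ((window_eq fs.toList seq.toList i.toNat).mpr hC))]
      · rw [if_neg (by rintro ⟨_, _, hc⟩; exact hC (fun k hk => hc k (by omega) hk)),
          if_neg (fun h => hC ((window_eq fs.toList seq.toList i.toNat).mp (beq_iff_eq.mp h)))])]
    rw [PySem.List.foldl_add, zero_add]
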